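-- pv_equiv track=rewrite | github.com/haengaan/haengaan | 출퇴근.py | get_day_to_workers
-- ===== SOURCE A (Python) =====
-- from copy import deepcopy
--
-- def get_day_to_workers(days, people_to_holidays):
--     day_to_workers = {}
--     _ = deepcopy(people_to_holidays)
--     for day in days:
--         day_to_workers[day] = list(people_to_holidays.keys())
--         for people in people_to_holidays:
--             holidays = people_to_holidays[people]
--             for holiday in holidays:
--                 if holiday == day:
--                     day_to_workers[day].remove(people)
--                     break
--
--     return day_to_workers
-- ===== SOURCE B (Python) =====
-- def get_day_to_workers(days, people_to_holidays):
--     # Inverted nesting: seed every day with the full worker list once, then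
--     # scatter-remove each person from the days in their (deduplicated) holiday set.
--     workers = list(people_to_holidays.keys())
--     day_to_workers = {day: list(workers) for day in days}
--     for person, holidays in people_to_holidays.items():
--         for day in set(holidays):
--             if day in day_to_workers:
--                 day_to_workers[day].remove(person)
--     return day_to_workers
-- ===== Notes on version B (the rewrite author's own statement) =====
-- stated objective: alternative
-- what changed: Inverts the nesting: instead of re-filtering all people per day (per-person holiday scan inside a per-day loop), B seeds every day with the full worker list once and then, per person, removes them only from the days in their deduplicated holiday set, dropping the dead deepcopy.
import Mathlib
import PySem

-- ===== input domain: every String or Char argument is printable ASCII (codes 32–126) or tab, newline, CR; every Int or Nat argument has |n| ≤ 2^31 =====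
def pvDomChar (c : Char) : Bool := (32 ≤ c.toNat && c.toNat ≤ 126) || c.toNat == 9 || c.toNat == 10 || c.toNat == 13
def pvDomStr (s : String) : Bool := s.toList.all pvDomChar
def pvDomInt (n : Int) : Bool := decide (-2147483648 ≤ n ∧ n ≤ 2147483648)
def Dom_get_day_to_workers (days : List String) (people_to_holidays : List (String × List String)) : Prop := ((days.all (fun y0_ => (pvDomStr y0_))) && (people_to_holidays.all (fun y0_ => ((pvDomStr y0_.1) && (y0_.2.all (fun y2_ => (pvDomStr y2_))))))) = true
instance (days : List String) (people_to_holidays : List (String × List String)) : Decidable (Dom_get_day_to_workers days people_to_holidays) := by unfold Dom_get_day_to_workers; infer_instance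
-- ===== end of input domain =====

-- B inverts the nesting (seed every day with all workers once, then per person remove
-- them from the days in their deduplicated holiday set) and drops the dead deepcopy.

-- ===== PORT A =====
-- The Python dict parameter is materialised as a PySem.Dict (Python dict semantics).
-- `_ = deepcopy(people_to_holidays)` is dead and produces nothing; it is dropped.
def get_day_to_workers (days : List String) (people_to_holidays : List (String × List String)) : List (String × List String) :=
  let p2h := PySem.Dict.ofList people_to_holidays
  let d2w := days.foldl (fun d2w day =>
    -- day_to_workers[day] = list(people_to_holidays.keys()), then the people loop
    -- mutates that list in place; the inner `for holiday … break` searches for day.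
    let ws := (PySem.Dict.keys p2h).foldl (fun ws people =>
      let holidays := (PySem.Dict.get? p2h people).getD []   -- people is a key: lookup never raises
      if holidays.contains day then (PySem.List.remove? ws people).getD ws else ws)
      (PySem.Dict.keys p2h)
    PySem.Dict.insert d2w day ws) PySem.Dict.empty
  d2w.items

-- ===== PORT B =====
-- Python's `set(holidays)` iterates in hash order; the result does not depend on that
-- order (removals at distinct day keys are independent, one removal per person per day),
-- so iterating PySem.Set.ofList (first-occurrence order) is exact.
def get_day_to_workers_alt (days : List String) (people_to_holidays : List (String × List String)) : List (String × List String) :=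
  let p2h := PySem.Dict.ofList people_to_holidays
  let workers := PySem.Dict.keys p2h
  let seeded := days.foldl (fun d day => PySem.Dict.insert d day workers) PySem.Dict.empty
  let d2w := p2h.items.foldl (fun d2w pe =>
    (PySem.Set.ofList pe.2).foldl (fun d2w day =>
      if PySem.Dict.contains d2w day then
        PySem.Dict.modify d2w day [] (fun ws => (PySem.List.remove? ws pe.1).getD ws)
      else d2w) d2w) seeded
  d2w.items

-- ===== PRECONDITION & SPEC =====
def Spec_get_day_to_workers (days : List String) (people_to_holidays : List (String × List String)) (out : List (String × List String)) : Prop := out = get_day_to_workers_alt days people_to_holidays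
instance (days : List String) (people_to_holidays : List (String × List String)) (out : List (String × List String)) : Decidable (Spec_get_day_to_workers days people_to_holidays out) := by unfold Spec_get_day_to_workers; infer_instance

-- ===== CLAIM (what is proved, stated in full; the proofs are below) =====
def Claim_equal_get_day_to_workers : Prop := ∀ (days : List String) (people_to_holidays : List (String × List String)), Dom_get_day_to_workers days people_to_holidays → Spec_get_day_to_workers days people_to_holidays (get_day_to_workers days people_to_holidays)

-- ===== LEMMAS AND PROOFS =====

theorem pv_remove_getD_nodup (acc : List String) (p : String) (h : acc.Nodup) :
    (PySem.List.remove? acc p).getD acc = acc.filter (fun x => !(x == p)) := by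
  by_cases hm : p ∈ acc
  · rw [PySem.List.remove?_eq_some_erase _ _ hm, Option.getD_some, List.Nodup.erase_eq_filter h]
    apply List.filter_congr; intro x _
    simp [bne, BEq.comm]
  · rw [(PySem.List.remove?_eq_none_iff _ _).mpr hm, Option.getD_none]
    symm; apply List.filter_eq_self.mpr
    intro x hx; simp; rintro rfl; exact hm hx

theorem pv_removeFold_A (c : String → Bool) (l acc : List String) (h : acc.Nodup) :
    l.foldl (fun a p => if c p then (PySem.List.remove? a p).getD a else a) acc
      = acc.filter (fun x => !(c x && decide (x ∈ l))) := by
  induction l generalizing acc with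
  | nil => simp
  | cons p l ih =>
    simp only [List.foldl_cons]
    by_cases hc : c p
    · rw [hc]; simp only [if_true]
      rw [pv_remove_getD_nodup _ _ h, ih _ (h.filter _), List.filter_filter]
      apply List.filter_congr; intro x _
      by_cases hxp : x = p
      · subst hxp; simp [hc]
      · simp [hxp]
    · rw [if_neg hc, ih _ h]
      apply List.filter_congr; intro x _
      by_cases hxp : x = p
      · subst hxp; simp [hc]
      · simp [hxp]

theorem pv_removeFold_B (k : String) (l : List (String × List String)) (acc : List String) (h : acc.Nodup) :
    l.foldl (fun ws pe => if pe.2.contains k then (PySem.List.remove? ws pe.1).getD ws else ws) acc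
      = acc.filter (fun x => !(l.any (fun pe => pe.1 == x && pe.2.contains k))) := by
  induction l generalizing acc with
  | nil => simp
  | cons pe l ih =>
    simp only [List.foldl_cons]
    by_cases hc : pe.2.contains k
    · have hk : k ∈ pe.2 := by simpa using hc
      rw [hc]; simp only [if_true]
      rw [pv_remove_getD_nodup _ _ h, ih _ (h.filter _), List.filter_filter]
      apply List.filter_congr; intro x _
      by_cases hxp : x = pe.1
      · subst hxp; simp [hk]
      · simp [hk, Bool.and_comm, BEq.comm]
    · have hnk : k ∉ pe.2 := by simpa using hc
      rw [if_neg hc, ih _ h]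
      apply List.filter_congr; intro x _
      simp [hnk]

theorem pv_getD_foldl_insert (g : String → List String) (ds : List String) (d : PySem.Dict String (List String)) (k : String) :
    (ds.foldl (fun d day => d.insert day (g day)) d).getD k []
      = if k ∈ ds then g k else d.getD k [] := by
  induction ds generalizing d with
  | nil => simp
  | cons p ds ih =>
    simp only [List.foldl_cons, ih, List.mem_cons]
    by_cases hm : k ∈ ds
    · simp [hm]
    · by_cases hkp : k = p
      · subst hkp; simp [hm, PySem.Dict.getD_insert_self]
      · simp [hm, hkp, PySem.Dict.getD_insert_of_ne _ _ _ hkp]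

theorem pv_contains_foldl_insert (g : String → List String) (ds : List String) (d : PySem.Dict String (List String)) (k : String) :
    (ds.foldl (fun d day => d.insert day (g day)) d).contains k
      = (decide (k ∈ ds) || d.contains k) := by
  induction ds generalizing d with
  | nil => simp
  | cons p ds ih =>
    simp only [List.foldl_cons, ih, PySem.Dict.contains_insert, List.mem_cons]
    by_cases hkp : k = p <;> simp [beq_eq_decide, hkp]

theorem pv_keys_inner (f : List String → List String) (s : List String) (d : PySem.Dict String (List String)) :
    (s.foldl (fun d x => if d.contains x then d.modify x [] f else d) d).keys = d.keys := by
  induction s generalizing d with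
  | nil => rfl
  | cons x s ih =>
    simp only [List.foldl_cons, ih]
    by_cases hc : d.contains x
    · simp [hc, PySem.Dict.keys_modify, PySem.Dict.keys_insert_of_contains _ _ hc]
    · simp [hc]

theorem pv_contains_inner (f : List String → List String) (s : List String) (d : PySem.Dict String (List String)) (k : String) :
    (s.foldl (fun d x => if d.contains x then d.modify x [] f else d) d).contains k = d.contains k := by
  rw [PySem.Dict.contains_eq_decide_mem_keys, PySem.Dict.contains_eq_decide_mem_keys, pv_keys_inner]

theorem pv_keys_scatter (ps : List (String × List String)) (d : PySem.Dict String (List String)) :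
    (ps.foldl (fun d2w pe =>
      (PySem.Set.ofList pe.2).foldl (fun d2w day =>
        if PySem.Dict.contains d2w day then
          PySem.Dict.modify d2w day [] (fun ws => (PySem.List.remove? ws pe.1).getD ws)
        else d2w) d2w) d).keys = d.keys := by
  induction ps generalizing d with
  | nil => rfl
  | cons pe ps ih => simp only [List.foldl_cons, ih, pv_keys_inner]

theorem pv_getD_inner (f : List String → List String) (s : List String) (hs : s.Nodup)
    (d : PySem.Dict String (List String)) (k : String) :
    (s.foldl (fun d x => if d.contains x then d.modify x [] f else d) d).getD k []
      = if k ∈ s ∧ d.contains k = true then f (d.getD k []) else d.getD k [] := by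
  induction s generalizing d with
  | nil => simp
  | cons x s ih =>
    have hxs : x ∉ s := (List.nodup_cons.mp hs).1
    have hsn : s.Nodup := (List.nodup_cons.mp hs).2
    simp only [List.foldl_cons]
    by_cases hkx : k = x
    · subst hkx
      by_cases hc : d.contains k
      · rw [if_pos hc, ih hsn]
        have h1 : (d.modify k [] f).contains k = d.contains k := by
          simp [PySem.Dict.contains_modify, hc]
        rw [PySem.Dict.getD_modify]
        simp [hxs, hc]
      · rw [if_neg hc, ih hsn]
        simp [hxs, hc]
    · have step : ∀ d' : PySem.Dict String (List String),
        (if d'.contains x = true then d'.modify x [] f else d') = d' ∨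
        (if d'.contains x = true then d'.modify x [] f else d') = d'.modify x [] f := by
        intro d'; by_cases h : d'.contains x <;> simp [h]
      rcases step d with he | he <;> rw [he, ih hsn]
      · simp [hkx]
      · have hg : (d.modify x [] f).getD k [] = d.getD k [] := by
          rw [PySem.Dict.getD_modify]; simp [hkx]
        have hcc : (d.modify x [] f).contains k = (decide (k = x) || d.contains k) := by
          simp [PySem.Dict.contains_modify, beq_eq_decide]
        rw [hg, hcc]
        simp [hkx]

theorem pv_getD_scatter (ps : List (String × List String)) (d : PySem.Dict String (List String)) (k : String)
    (hk : d.contains k = true) :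
    (ps.foldl (fun d2w pe =>
      (PySem.Set.ofList pe.2).foldl (fun d2w day =>
        if PySem.Dict.contains d2w day then
          PySem.Dict.modify d2w day [] (fun ws => (PySem.List.remove? ws pe.1).getD ws)
        else d2w) d2w) d).getD k []
      = ps.foldl (fun ws pe => if pe.2.contains k then (PySem.List.remove? ws pe.1).getD ws else ws) (d.getD k []) := by
  induction ps generalizing d with
  | nil => simp
  | cons pe ps ih =>
    simp only [List.foldl_cons]
    rw [ih _ (by rw [pv_contains_inner]; exact hk)]
    congr 1
    rw [pv_getD_inner _ _ (PySem.Set.nodup_ofList _)]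
    by_cases hm : pe.2.contains k
    · have : k ∈ PySem.Set.ofList pe.2 := (PySem.Set.mem_ofList _ _).mpr (by simpa using hm)
      have hk2 : k ∈ pe.2 := by simpa using hm
      simp [this, hk, hk2]
    · have : k ∉ PySem.Set.ofList pe.2 := fun h => hm (by simpa using (PySem.Set.mem_ofList _ _).mp h)
      have hk2 : k ∉ pe.2 := by simpa using hm
      simp [this, hk2]

theorem pv_any_nodup (l : List String) (h : l.Nodup) (x : String) (hx : x ∈ l) (P : String → Bool) :
    l.any (fun k => (k == x) && P k) = P x := by
  induction l with
  | nil => cases hx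
  | cons a l ih =>
    have hal : a ∉ l := (List.nodup_cons.mp h).1
    by_cases hax : a = x
    · subst hax
      have : l.any (fun k => (k == a) && P k) = false := by
        apply List.any_eq_false.mpr
        intro k hk
        have : k ≠ a := fun he => hal (he ▸ hk)
        simp [this]
      simp [this]
    · have hxl : x ∈ l := by
        rcases List.mem_cons.mp hx with h1 | h1
        · exact absurd h1.symm hax
        · exact h1
      simp only [List.any_cons]
      rw [ih (List.nodup_cons.mp h).2 hxl]
      simp [hax]

theorem pv_items_eq (d1 d2 : PySem.Dict String (List String)) (h1 : d1.keys.Nodup)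
    (hk : d1.keys = d2.keys) (hv : ∀ k ∈ d1.keys, d1.getD k [] = d2.getD k []) :
    d1.items = d2.items := by
  rw [PySem.Dict.items_eq_map_keys d1 h1 [], PySem.Dict.items_eq_map_keys d2 (hk ▸ h1) [], ← hk]
  apply List.map_congr_left
  intro k hkm
  rw [hv k hkm]

theorem get_day_to_workers_spec : Claim_equal_get_day_to_workers := by
  intro days p2hl _
  unfold Spec_get_day_to_workers get_day_to_workers get_day_to_workers_alt
  simp only []
  have hnd : (PySem.Dict.ofList p2hl).keys.Nodup := PySem.Dict.nodup_keys_ofList _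
  have hupd : PySem.Set.update ([] : List String) days = PySem.Set.ofList days := by
    rw [PySem.Set.ofList_eq_foldl]; rfl
  apply pv_items_eq
  · -- keys of A-side dict are duplicate-free
    apply PySem.Dict.nodup_keys_foldl_insert
    simp
  · -- equal key lists
    rw [pv_keys_scatter, PySem.Dict.keys_foldl_insert, PySem.Dict.keys_foldl_insert]
  · -- equal values at every key
    intro k hkm
    rw [PySem.Dict.keys_foldl_insert, PySem.Dict.keys_empty, hupd] at hkm
    have hkd : k ∈ days := (PySem.Set.mem_ofList _ _).mp hkm
    rw [pv_getD_foldl_insert, if_pos hkd]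
    have hcont : (days.foldl (fun d day => d.insert day (PySem.Dict.ofList p2hl).keys) PySem.Dict.empty).contains k = true := by
      rw [pv_contains_foldl_insert]; simp [hkd]
    rw [pv_getD_scatter _ _ _ hcont, pv_getD_foldl_insert, if_pos hkd]
    rw [pv_removeFold_A _ _ _ hnd, pv_removeFold_B _ _ _ hnd]
    apply List.filter_congr
    intro x hx
    have hany : (PySem.Dict.ofList p2hl).items.any
        (fun pe => pe.1 == x && pe.2.contains k)
          = ((PySem.Dict.ofList p2hl).getD x []).contains k := by
      rw [PySem.Dict.items_eq_map_keys _ hnd [], List.any_map]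
      exact pv_any_nodup _ hnd x hx (fun j => ((PySem.Dict.ofList p2hl).getD j []).contains k)
    rw [hany, PySem.Dict.getD_eq_get?_getD]
    simp [hx]
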